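-- pv_equiv track=rewrite | github.com/prakeerthprasadoff/AILearningHelper | wolfram_alpha.py | _lookup_in_cache
-- ===== SOURCE A (Python) =====
-- from typing import List, Optional
--
-- def _normalize_question(q: str) -> str:
--     """Normalize for fuzzy matching (strip, lowercase, collapse spaces)."""
--     return " ".join(q.lower().strip().split())
--
-- def _lookup_in_cache(question: str, cache: List[dict]) -> Optional[dict]:
--     """Find a matching question in the wolfram_questions.json cache."""
--     norm = _normalize_question(question)
--     for item in cache:
--         if _normalize_question(item.get("question", "")) == norm:
--             return item
--     # Fuzzy: check if question is a substring or vice versa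
--     for item in cache:
--         q = item.get("question", "")
--         if norm in _normalize_question(q) or _normalize_question(q) in norm:
--             return item
--     return None
-- ===== SOURCE B (Python) =====
-- from typing import List, Optional
--
-- def _normalize_question(q: str) -> str:
--     """Normalize for fuzzy matching (strip, lowercase, collapse spaces)."""
--     return " ".join(q.lower().strip().split())
--
-- def _lookup_in_cache(question: str, cache: List[dict]) -> Optional[dict]:
--     """Single pass: return first exact match; otherwise first fuzzy (substring) match."""
--     norm = _normalize_question(question)
--     fuzzy = None
--     for item in cache:
--         nq = _normalize_question(item.get("question", ""))
--         if nq == norm: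
--             return item
--         if fuzzy is None and (norm in nq or nq in norm):
--             fuzzy = item
--     return fuzzy
-- ===== Notes on version B (the rewrite author's own statement) =====
-- stated objective: alternative
-- what changed: Replaces A's two sequential scans (exact pass, then a separate fuzzy pass that re-normalizes every question) with one scan that normalizes each cached question once, returning on an exact hit and deferring the first fuzzy hit until the loop ends.
import Mathlib
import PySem

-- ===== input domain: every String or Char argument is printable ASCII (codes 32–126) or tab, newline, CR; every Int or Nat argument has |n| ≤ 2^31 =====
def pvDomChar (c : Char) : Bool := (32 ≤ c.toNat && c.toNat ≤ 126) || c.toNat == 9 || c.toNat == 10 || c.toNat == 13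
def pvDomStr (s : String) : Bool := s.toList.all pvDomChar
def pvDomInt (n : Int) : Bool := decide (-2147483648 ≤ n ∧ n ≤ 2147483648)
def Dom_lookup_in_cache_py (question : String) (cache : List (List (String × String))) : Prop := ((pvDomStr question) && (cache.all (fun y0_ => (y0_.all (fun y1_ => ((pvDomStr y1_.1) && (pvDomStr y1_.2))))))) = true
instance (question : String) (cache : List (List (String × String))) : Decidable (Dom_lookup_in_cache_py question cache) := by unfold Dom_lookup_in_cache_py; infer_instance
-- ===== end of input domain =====

-- B merges A's two scans into one pass that normalizes each cached question once,
-- returning on an exact hit and recording the first fuzzy hit for the end (objective: alternative, single pass).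

-- ===== PORT A =====
-- _normalize_question: " ".join(q.lower().strip().split())
def pvNormQ (q : String) : String :=
  PySem.Str.join " " (PySem.Str.split₀ (PySem.Str.strip (PySem.Str.lower q)))

-- first loop of A: exact match on the normalized question
def pvScanExact (norm : String) : List (List (String × String)) → Option (List (String × String))
  | [] => none
  | item :: rest =>
    if pvNormQ ((PySem.Dict.mk item).getD "question" "") == norm then some item
    else pvScanExact norm rest

-- second loop of A: substring (fuzzy) match
def pvScanFuzzy (norm : String) : List (List (String × String)) → Option (List (String × String))
  | [] => none
  | item :: rest =>
    let q := (PySem.Dict.mk item).getD "question" ""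
    if PySem.Str.isIn norm (pvNormQ q) || PySem.Str.isIn (pvNormQ q) norm then some item
    else pvScanFuzzy norm rest

def lookup_in_cache_py (question : String) (cache : List (List (String × String))) : Option (List (String × String)) :=
  let norm := pvNormQ question
  match pvScanExact norm cache with
  | some item => some item
  | none => pvScanFuzzy norm cache

-- ===== PORT B =====
-- single pass with a pending fuzzy candidate (Source B's loop)
def pvLoopB (norm : String) (fuzzy : Option (List (String × String))) :
    List (List (String × String)) → Option (List (String × String))
  | [] => fuzzy
  | item :: rest =>
    let nq := pvNormQ ((PySem.Dict.mk item).getD "question" "")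
    if nq == norm then some item
    else
      pvLoopB norm
        (if fuzzy.isNone && (PySem.Str.isIn norm nq || PySem.Str.isIn nq norm) then some item else fuzzy)
        rest

def lookup_in_cache_py_alt (question : String) (cache : List (List (String × String))) : Option (List (String × String)) :=
  pvLoopB (pvNormQ question) none cache

-- ===== PRECONDITION & SPEC =====
def Spec_lookup_in_cache_py (question : String) (cache : List (List (String × String))) (out : Option (List (String × String))) : Prop := out = lookup_in_cache_py_alt question cache
instance (question : String) (cache : List (List (String × String))) (out : Option (List (String × String))) : Decidable (Spec_lookup_in_cache_py question cache out) := by unfold Spec_lookup_in_cache_py; infer_instance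

-- ===== CLAIM (what is proved, stated in full; the proofs are below) =====
def Claim_equal_lookup_in_cache_py : Prop := ∀ (question : String) (cache : List (List (String × String))), Dom_lookup_in_cache_py question cache → Spec_lookup_in_cache_py question cache (lookup_in_cache_py question cache)

-- ===== LEMMAS AND PROOFS =====
-- loop invariant: B's single pass equals "exact scan, else pending fuzzy, else fuzzy scan"
theorem pvLoopB_eq (norm : String) (fuzzy : Option (List (String × String)))
    (l : List (List (String × String))) :
    pvLoopB norm fuzzy l =
      match pvScanExact norm l with
      | some item => some item
      | none => match fuzzy with
                | some f => some f
                | none => pvScanFuzzy norm l := by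
  induction l generalizing fuzzy with
  | nil => cases fuzzy <;> simp [pvLoopB, pvScanExact, pvScanFuzzy]
  | cons item rest ih =>
    simp only [pvLoopB, pvScanExact, pvScanFuzzy]
    by_cases h : (pvNormQ ((PySem.Dict.mk item).getD "question" "") == norm) = true
    · simp [h]
    · simp only [h, if_false, Bool.false_eq_true]
      rw [ih]
      cases fuzzy with
      | some f => simp
      | none =>
        cases pvScanExact norm rest <;> simp only [Option.isNone_none, Bool.true_and] <;> split_ifs <;> rfl

-- ===== VERDICT (by name: the statement is the Claim_ definition above) =====
theorem lookup_in_cache_py_spec : Claim_equal_lookup_in_cache_py := by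
  intro question cache _
  unfold Spec_lookup_in_cache_py lookup_in_cache_py lookup_in_cache_py_alt
  rw [pvLoopB_eq]
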